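-- pv_equiv track=rewrite | github.com/Zachary116699/mahjongcalc | utils.py | codes_to_str
-- ===== SOURCE A (Python) =====
-- def codes_to_str(tiles_list):
--     """将牌列表转化为牌字符"""
--     man = []
--     pin = []
--     sou = []
--     zi = []
--     for tile in tiles_list:
--         if 1 <= tile <= 9:
--             man.append(tile)
--         if 11 <= tile <= 19:
--             pin.append(tile - 10)
--         if 21 <= tile <= 29:
--             sou.append(tile - 20)
--         if tile >= 31:
--             zi.append(int((tile - 30) / 2))
--     tiles_str = ''
--     if len(man) != 0:
--         for code in man:
--             tiles_str += str(code)
--         tiles_str += 'm'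
--     if len(pin) != 0:
--         for code in pin:
--             tiles_str += str(code)
--         tiles_str += 'p'
--     if len(sou) != 0:
--         for code in sou:
--             tiles_str += str(code)
--         tiles_str += 's'
--     if len(zi) != 0:
--         for code in zi:
--             tiles_str += str(code)
--         tiles_str += 'z'
--     return tiles_str
-- ===== SOURCE B (Python) =====
-- def codes_to_str(tiles_list):
--     """将牌列表转化为牌字符"""
--     rows = ((1, 9, 0, 1, 'm'), (11, 19, 10, 1, 'p'), (21, 29, 20, 1, 's'), (31, None, 30, 2, 'z'))
--     parts = []
--     for lo, hi, off, div, suf in rows: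
--         codes = [(t - off) // div for t in tiles_list if lo <= t and (hi is None or t <= hi)]
--         if codes:
--             parts.append(''.join(str(c) for c in codes) + suf)
--     return ''.join(parts)
-- ===== Notes on version B (the rewrite author's own statement) =====
-- stated objective: simpler
-- what changed: Replaces A's single bucketing pass into four mutable lists plus a += formatting cascade with a data-driven table of four (range, offset, divisor, suffix) rows, each handled by one comprehension and a join.
import Mathlib
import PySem

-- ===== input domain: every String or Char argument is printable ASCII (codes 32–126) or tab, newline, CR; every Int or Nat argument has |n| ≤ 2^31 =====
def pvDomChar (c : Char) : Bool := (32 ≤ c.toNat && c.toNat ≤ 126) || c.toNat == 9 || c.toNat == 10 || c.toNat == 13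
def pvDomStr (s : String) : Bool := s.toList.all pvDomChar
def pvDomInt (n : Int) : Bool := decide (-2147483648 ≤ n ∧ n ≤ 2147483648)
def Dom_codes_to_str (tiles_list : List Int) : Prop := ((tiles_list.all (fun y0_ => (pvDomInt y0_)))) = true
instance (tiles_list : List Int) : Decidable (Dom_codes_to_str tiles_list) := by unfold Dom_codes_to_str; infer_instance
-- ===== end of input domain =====

-- B restates A's bucket-then-format pass as a data-driven table of four (range, offset, divisor, suffix)
-- rows, each handled by one filter/map scan and a join (objective: simpler).

-- ===== PORT A =====
-- Strings are ported as List Char (wrapped with String.ofList at the return), since Lean's own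
-- String.append is opaque to the kernel; this is exact on the ASCII output A produces.
-- `int((tile - 30) / 2)`: on Dom (|tile| ≤ 2^31) the float division by 2 is exact and, since
-- tile ≥ 31 there, the quotient is positive, so int() truncation equals floor division; ported
-- as PySem.Int.floordiv (tile - 30) 2, which is exact on that domain.
def pvStepA (s : List Int × List Int × List Int × List Int) (tile : Int) :
    List Int × List Int × List Int × List Int :=
  let s := if 1 ≤ tile ∧ tile ≤ 9 then (s.1 ++ [tile], s.2.1, s.2.2.1, s.2.2.2) else s
  let s := if 11 ≤ tile ∧ tile ≤ 19 then (s.1, s.2.1 ++ [tile - 10], s.2.2.1, s.2.2.2) else s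
  let s := if 21 ≤ tile ∧ tile ≤ 29 then (s.1, s.2.1, s.2.2.1 ++ [tile - 20], s.2.2.2) else s
  if tile ≥ 31 then (s.1, s.2.1, s.2.2.1, s.2.2.2 ++ [PySem.Int.floordiv (tile - 30) 2]) else s

def codes_to_str (tiles_list : List Int) : String :=
  let b := tiles_list.foldl pvStepA ([], [], [], [])
  let ts : List Char := []
  let ts := if b.1.length ≠ 0 then
    (b.1.foldl (fun a c => a ++ PySem.Int.toChars c) ts) ++ ['m'] else ts
  let ts := if b.2.1.length ≠ 0 then
    (b.2.1.foldl (fun a c => a ++ PySem.Int.toChars c) ts) ++ ['p'] else ts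
  let ts := if b.2.2.1.length ≠ 0 then
    (b.2.2.1.foldl (fun a c => a ++ PySem.Int.toChars c) ts) ++ ['s'] else ts
  let ts := if b.2.2.2.length ≠ 0 then
    (b.2.2.2.foldl (fun a c => a ++ PySem.Int.toChars c) ts) ++ ['z'] else ts
  String.ofList ts

-- ===== PORT B =====
-- Transcribes Source B: a literal table of four rows; per row one filter/map comprehension,
-- ''.join of the digit strings plus the suffix; ''.join of the collected parts at the end.
def pvRowsB : List (Int × Option Int × Int × Int × Char) :=
  [(1, some 9, 0, 1, 'm'), (11, some 19, 10, 1, 'p'), (21, some 29, 20, 1, 's'), (31, none, 30, 2, 'z')]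

def codes_to_str_alt (tiles_list : List Int) : String :=
  let parts := pvRowsB.foldl (fun (parts : List (List Char)) r =>
    let codes := (tiles_list.filter (fun t =>
        decide (r.1 ≤ t) && (match r.2.1 with | none => true | some hi => decide (t ≤ hi)))).map
      (fun t => PySem.Int.floordiv (t - r.2.2.1) r.2.2.2.1)
    if codes ≠ [] then
      parts ++ [PySem.Chars.join [] (codes.map PySem.Int.toChars) ++ [r.2.2.2.2]]
    else parts) []
  String.ofList (PySem.Chars.join [] parts)

-- ===== PRECONDITION & SPEC =====
def Spec_codes_to_str (tiles_list : List Int) (out : String) : Prop := out = codes_to_str_alt tiles_list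
instance (tiles_list : List Int) (out : String) : Decidable (Spec_codes_to_str tiles_list out) := by unfold Spec_codes_to_str; infer_instance

-- ===== CLAIM (what is proved, stated in full; the proofs are below) =====
def Claim_equal_codes_to_str : Prop := ∀ (tiles_list : List Int), Dom_codes_to_str tiles_list → Spec_codes_to_str tiles_list (codes_to_str tiles_list)

-- ===== LEMMAS AND PROOFS =====

theorem join_nil_flatten (xss : List (List Char)) : PySem.Chars.join [] xss = xss.flatten := by
  induction xss with
  | nil => rfl
  | cons x xs ih =>
    cases xs with
    | nil => simp [PySem.Chars.join, List.intercalate]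
    | cons y ys =>
      simp only [PySem.Chars.join] at ih ⊢
      rw [show ([].intercalate (x :: y :: ys) : List Char) = x ++ [].intercalate (y :: ys) from rfl, ih]
      simp

theorem bucketsA_eq (l : List Int) (a b c d : List Int) :
    l.foldl pvStepA (a, b, c, d) =
      (a ++ l.filter (fun t => decide (1 ≤ t ∧ t ≤ 9)),
       b ++ (l.filter (fun t => decide (11 ≤ t ∧ t ≤ 19))).map (fun t => t - 10),
       c ++ (l.filter (fun t => decide (21 ≤ t ∧ t ≤ 29))).map (fun t => t - 20),
       d ++ (l.filter (fun t => decide (31 ≤ t))).map (fun t => PySem.Int.floordiv (t - 30) 2)) := by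
  induction l generalizing a b c d with
  | nil => simp
  | cons t l ih =>
    simp only [List.foldl_cons, List.filter_cons]
    rw [ih]
    by_cases h1 : 1 ≤ t ∧ t ≤ 9 <;> by_cases h2 : 11 ≤ t ∧ t ≤ 19 <;>
      by_cases h3 : 21 ≤ t ∧ t ≤ 29 <;> by_cases h4 : 31 ≤ t <;>
      first
        | omega
        | simp [pvStepA, h1, h2, h3, h4]

-- ===== VERDICT (by name: the statement is the Claim_ definition above) =====
theorem codes_to_str_spec : Claim_equal_codes_to_str := by
  intro l _
  unfold Spec_codes_to_str codes_to_str codes_to_str_alt pvRowsB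
  rw [bucketsA_eq]
  simp only [List.foldl_cons, List.foldl_nil, List.nil_append, Bool.decide_and, Bool.and_true]
  rw [show (fun t : Int => PySem.Int.floordiv (t - 0) 1) = (fun t : Int => t) from
        funext fun t => by rw [PySem.Int.floordiv_eq_ediv_of_pos one_pos]; simp,
      show (fun t : Int => PySem.Int.floordiv (t - 10) 1) = (fun t : Int => t - 10) from
        funext fun t => by rw [PySem.Int.floordiv_eq_ediv_of_pos one_pos]; simp,
      show (fun t : Int => PySem.Int.floordiv (t - 20) 1) = (fun t : Int => t - 20) from
        funext fun t => by rw [PySem.Int.floordiv_eq_ediv_of_pos one_pos]; simp,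
      List.map_id']
  generalize (List.filter (fun t : Int => decide (1 ≤ t) && decide (t ≤ 9)) l) = m
  generalize (List.map (fun t : Int => t - 10) (List.filter (fun t => decide (11 ≤ t) && decide (t ≤ 19)) l)) = p
  generalize (List.map (fun t : Int => t - 20) (List.filter (fun t => decide (21 ≤ t) && decide (t ≤ 29)) l)) = s
  generalize (List.map (fun t : Int => PySem.Int.floordiv (t - 30) 2) (List.filter (fun t => decide (31 ≤ t)) l)) = z
  by_cases hm : m = [] <;> by_cases hp : p = [] <;> by_cases hs : s = [] <;> by_cases hz : z = [] <;>
    simp [hm, hp, hs, hz, PySem.List.foldl_append_eq_flatMap, join_nil_flatten, List.flatMap_def]
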